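-- pv_equiv track=rewrite | github.com/t-0hmura/mlmm_toolkit | mlmm/def_ml_region.py | continuous_segments
-- ===== SOURCE A (Python) =====
-- from typing import Dict, List, Set, Tuple
--
-- def continuous_segments(sorted_ids: List[Tuple]):
--     segs, cur, prev = [], [], None
--     for fid in sorted_ids:
--         idx = fid[3][1]
--         if prev is None or idx == prev + 1:
--             cur.append(fid)
--         else:
--             segs.append(cur)
--             cur = [fid]
--         prev = idx
--     if cur:
--         segs.append(cur)
--     return segs
-- ===== SOURCE B (Python) =====
-- from itertools import groupby
-- from typing import Dict, List, Set, Tuple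
--
-- def continuous_segments(sorted_ids: List[Tuple]):
--     return [[fid for _, fid in grp]
--             for _, grp in groupby(enumerate(sorted_ids),
--                                   key=lambda p: p[1][3][1] - p[0])]
-- ===== Notes on version B (the rewrite author's own statement) =====
-- stated objective: idiomatic
-- what changed: Replaces the explicit segs/cur/prev accumulator loop with itertools.groupby over enumerate(sorted_ids) keyed by idx - position, so consecutive +1 runs share a constant key and grouping is done by the standard library.
import Mathlib
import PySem

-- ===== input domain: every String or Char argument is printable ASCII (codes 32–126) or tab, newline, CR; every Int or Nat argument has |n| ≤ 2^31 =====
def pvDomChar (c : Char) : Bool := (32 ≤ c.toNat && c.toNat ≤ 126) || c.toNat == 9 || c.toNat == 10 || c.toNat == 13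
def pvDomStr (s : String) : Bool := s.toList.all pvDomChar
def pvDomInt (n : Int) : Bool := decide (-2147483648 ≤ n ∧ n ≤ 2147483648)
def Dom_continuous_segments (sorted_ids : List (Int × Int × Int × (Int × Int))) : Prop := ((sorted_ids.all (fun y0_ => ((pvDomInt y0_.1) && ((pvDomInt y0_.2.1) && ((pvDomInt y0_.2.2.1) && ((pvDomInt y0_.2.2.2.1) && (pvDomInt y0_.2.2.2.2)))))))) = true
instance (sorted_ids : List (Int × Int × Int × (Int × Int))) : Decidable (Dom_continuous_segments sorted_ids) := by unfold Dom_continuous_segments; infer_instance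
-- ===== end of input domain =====

-- B replaces A's explicit segs/cur/prev accumulator loop with groupby over
-- enumerate(sorted_ids) keyed by idx - position (idiomatic; same cost).

-- ===== PORT A =====
-- one loop step of A: state = (segs, cur, prev)
def csStep (st : List (List (Int × Int × Int × (Int × Int))) × List (Int × Int × Int × (Int × Int)) × Option Int)
    (fid : Int × Int × Int × (Int × Int)) :
    List (List (Int × Int × Int × (Int × Int))) × List (Int × Int × Int × (Int × Int)) × Option Int :=
  let idx := fid.2.2.2.2
  match st with
  | (segs, cur, prev) =>
    if prev = none ∨ some idx = prev.map (· + 1) then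
      (segs, cur ++ [fid], some idx)
    else
      (segs ++ [cur], [fid], some idx)

-- the trailing `if cur: segs.append(cur)` of A
def csFin (st : List (List (Int × Int × Int × (Int × Int))) × List (Int × Int × Int × (Int × Int)) × Option Int) :
    List (List (Int × Int × Int × (Int × Int))) :=
  match st with
  | (segs, cur, _) => if cur ≠ [] then segs ++ [cur] else segs

def continuous_segments (sorted_ids : List (Int × Int × Int × (Int × Int))) : List (List (Int × Int × Int × (Int × Int))) :=
  csFin (sorted_ids.foldl csStep ([], [], none))

-- ===== PORT B =====
-- itertools.groupby on an explicit list: consecutive elements with equal key share a group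
def csKey (p : Int × (Int × Int × Int × (Int × Int))) : Int := p.2.2.2.2.2 - p.1

def csGroupby : List (Int × (Int × Int × Int × (Int × Int))) → List (List (Int × (Int × Int × Int × (Int × Int))))
  | [] => []
  | p :: l =>
    match csGroupby l with
    | (q :: g) :: gs =>
      if csKey p = csKey q then (p :: q :: g) :: gs else [p] :: (q :: g) :: gs
    | _ => [[p]]

def continuous_segments_alt (sorted_ids : List (Int × Int × Int × (Int × Int))) : List (List (Int × Int × Int × (Int × Int))) :=
  (csGroupby (PySem.List.enumerate sorted_ids)).map (fun g => g.map Prod.snd)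

-- ===== PRECONDITION & SPEC =====
def Spec_continuous_segments (sorted_ids : List (Int × Int × Int × (Int × Int))) (out : List (List (Int × Int × Int × (Int × Int)))) : Prop := out = continuous_segments_alt sorted_ids
instance (sorted_ids : List (Int × Int × Int × (Int × Int))) (out : List (List (Int × Int × Int × (Int × Int)))) : Decidable (Spec_continuous_segments sorted_ids out) := by unfold Spec_continuous_segments; infer_instance

-- ===== CLAIM (what is proved, stated in full; the proofs are below) =====
def Claim_equal_continuous_segments : Prop := ∀ (sorted_ids : List (Int × Int × Int × (Int × Int))), Dom_continuous_segments sorted_ids → Spec_continuous_segments sorted_ids (continuous_segments sorted_ids)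

-- ===== LEMMAS AND PROOFS =====

-- reference grouping: groups of x :: xs, splitting when idx does not increase by 1
def csRef (x : Int × Int × Int × (Int × Int)) : List (Int × Int × Int × (Int × Int)) → List (List (Int × Int × Int × (Int × Int)))
  | [] => [[x]]
  | y :: ys =>
    if y.2.2.2.2 = x.2.2.2.2 + 1 then
      match csRef y ys with
      | g :: gs => (x :: g) :: gs
      | [] => [[x]]
    else
      [x] :: csRef y ys

theorem csRef_ne_nil (x : Int × Int × Int × (Int × Int)) (xs : List (Int × Int × Int × (Int × Int))) :
    csRef x xs ≠ [] := by
  cases xs with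
  | nil => simp [csRef]
  | cons y ys =>
    simp only [csRef]
    split
    · cases h : csRef y ys <;> simp
    · simp

-- A's loop invariant
theorem csA_fold (xs : List (Int × Int × Int × (Int × Int)))
    (segs : List (List (Int × Int × Int × (Int × Int)))) (cur : List (Int × Int × Int × (Int × Int)))
    (x : Int × Int × Int × (Int × Int)) :
    csFin (xs.foldl csStep (segs, cur ++ [x], some x.2.2.2.2))
    = segs ++ (match csRef x xs with
               | g :: gs => (cur ++ g) :: gs
               | [] => []) := by
  induction xs generalizing segs cur x with
  | nil => simp [csRef, csFin]
  | cons y ys ih =>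
    rw [List.foldl_cons]
    by_cases h : y.2.2.2.2 = x.2.2.2.2 + 1
    · have hstep : csStep (segs, cur ++ [x], some x.2.2.2.2) y
          = (segs, (cur ++ [x]) ++ [y], some y.2.2.2.2) := by
        simp [csStep, h]
      rw [hstep]
      have hih := ih segs (cur ++ [x]) y
      rw [hih]
      simp only [csRef, if_pos h]
      cases hr : csRef y ys with
      | nil => exact absurd hr (csRef_ne_nil y ys)
      | cons g gs => simp
    · have hstep : csStep (segs, cur ++ [x], some x.2.2.2.2) y
          = (segs ++ [cur ++ [x]], [y], some y.2.2.2.2) := by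
        simp [csStep, h]
      rw [hstep]
      have := ih (segs ++ [cur ++ [x]]) [] y
      simp only [List.nil_append] at this
      rw [this]
      simp only [csRef, if_neg h]
      cases hr : csRef y ys with
      | nil => exact absurd hr (csRef_ne_nil y ys)
      | cons g gs => simp

theorem csA_eq_ref (x : Int × Int × Int × (Int × Int)) (xs : List (Int × Int × Int × (Int × Int))) :
    continuous_segments (x :: xs) = csRef x xs := by
  have h0 : csStep ([], [], none) x = ([], [x], some x.2.2.2.2) := by simp [csStep]
  unfold continuous_segments
  rw [List.foldl_cons, h0]
  have := csA_fold xs [] [] x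
  simp only [List.nil_append] at this
  rw [this]
  cases hr : csRef x xs with
  | nil => exact absurd hr (csRef_ne_nil x xs)
  | cons g gs => simp

-- first group of csGroupby starts with the first element
theorem csGroupby_cons (p : Int × (Int × Int × Int × (Int × Int))) (l : List (Int × (Int × Int × Int × (Int × Int)))) :
    ∃ g gs, csGroupby (p :: l) = (p :: g) :: gs := by
  rw [csGroupby]
  cases h : csGroupby l with
  | nil => exact ⟨[], [], rfl⟩
  | cons g0 gs =>
    cases g0 with
    | nil => exact ⟨[], [], rfl⟩
    | cons q g =>
      by_cases hk : csKey p = csKey q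
      · exact ⟨q :: g, gs, by simp [hk]⟩
      · exact ⟨[], (q :: g) :: gs, by simp [hk]⟩

theorem csGroupby_step (p q : Int × (Int × Int × Int × (Int × Int)))
    (l : List (Int × (Int × Int × Int × (Int × Int))))
    (g : List (Int × (Int × Int × Int × (Int × Int)))) (gs : List (List (Int × (Int × Int × Int × (Int × Int)))))
    (hg : csGroupby (q :: l) = (q :: g) :: gs) :
    csGroupby (p :: q :: l)
      = if csKey p = csKey q then (p :: q :: g) :: gs else [p] :: (q :: g) :: gs := by
  conv_lhs => rw [csGroupby]
  rw [hg]

-- B equals the reference on an enumerated nonempty list, for any start index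
theorem csB_eq_ref (x : Int × Int × Int × (Int × Int)) (xs : List (Int × Int × Int × (Int × Int))) (i : Int) :
    (csGroupby (PySem.List.enumerate (x :: xs) i)).map (fun g => g.map Prod.snd) = csRef x xs := by
  induction xs generalizing x i with
  | nil => simp [PySem.List.enumerate_cons, PySem.List.enumerate_nil, csGroupby, csRef]
  | cons y ys ih =>
    rw [PySem.List.enumerate_cons, PySem.List.enumerate_cons]
    obtain ⟨g, gs, hg⟩ := csGroupby_cons (i + 1, y) (PySem.List.enumerate ys (i + 1 + 1))
    rw [csGroupby_step (i, x) (i + 1, y) _ g gs hg]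
    have hih := ih y (i + 1)
    rw [PySem.List.enumerate_cons, hg] at hih
    have hkey : (csKey (i, x) = csKey (i + 1, y)) ↔ (y.2.2.2.2 = x.2.2.2.2 + 1) := by
      simp only [csKey]; omega
    by_cases h : y.2.2.2.2 = x.2.2.2.2 + 1
    · rw [if_pos (hkey.mpr h)]
      simp only [csRef, if_pos h]
      cases hr : csRef y ys with
      | nil => exact absurd hr (csRef_ne_nil y ys)
      | cons g' gs' =>
        rw [hr] at hih
        simp only [List.map_cons] at hih ⊢
        rw [List.cons.injEq] at hih
        obtain ⟨h1, h2⟩ := hih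
        subst h1
        subst h2
        simp
    · rw [if_neg (fun hc => h (hkey.mp hc))]
      simp only [csRef, if_neg h]
      simp only [List.map_cons] at hih ⊢
      rw [hih]
      simp

-- ===== VERDICT (by name: the statement is the Claim_ definition above) =====
theorem continuous_segments_spec : Claim_equal_continuous_segments := by
  intro ids _
  unfold Spec_continuous_segments continuous_segments_alt
  cases ids with
  | nil => simp [continuous_segments, csFin, PySem.List.enumerate_nil, csGroupby]
  | cons x xs => rw [csA_eq_ref, csB_eq_ref]
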